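-- pv_equiv track=rewrite | github.com/RevolF/workFlow | dmdDupHetDelTest.py | rtnAllPathIter
-- ===== SOURCE A (Python) =====
-- import itertools
--
-- def rtnAllPathIter(depthLen):
-- 	allPathList=[]
-- 	gap=depthLen - 2
-- 	while gap >= 0:
-- 		allComb=itertools.combinations(range(1,depthLen-1),gap)
-- 		for comb in allComb:
-- 			comb=list(comb)
-- 			comb.append(depthLen-1)
-- 			comb.insert(0,0)
-- 			allPathList.append(comb)
-- 		gap -= 1
--
-- 	return allPathList
-- ===== SOURCE B (Python) =====
-- def rtnAllPathIter(depthLen):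
--     # No middle indices and no 0 -> depthLen-1 edge to emit when depthLen < 2.
--     if depthLen < 2:
--         return []
--     # One sweep: powerset of the middle indices, each subset kept in ascending order.
--     subsets = [[]]
--     for x in range(1, depthLen - 1):
--         subsets += [s + [x] for s in subsets]
--     # Larger subsets first; lexicographic within a size (= itertools.combinations order).
--     subsets.sort(key=lambda s: (-len(s), s))
--     return [[0] + s + [depthLen - 1] for s in subsets]
-- ===== Notes on version B (the rewrite author's own statement) =====
-- stated objective: alternative
-- what changed: Replaces the per-size loop over itertools.combinations by a single powerset-building sweep over the middle indices followed by one sort with key (-len(s), s) that restores the size-descending, lexicographic-within-size order.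
import Mathlib
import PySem

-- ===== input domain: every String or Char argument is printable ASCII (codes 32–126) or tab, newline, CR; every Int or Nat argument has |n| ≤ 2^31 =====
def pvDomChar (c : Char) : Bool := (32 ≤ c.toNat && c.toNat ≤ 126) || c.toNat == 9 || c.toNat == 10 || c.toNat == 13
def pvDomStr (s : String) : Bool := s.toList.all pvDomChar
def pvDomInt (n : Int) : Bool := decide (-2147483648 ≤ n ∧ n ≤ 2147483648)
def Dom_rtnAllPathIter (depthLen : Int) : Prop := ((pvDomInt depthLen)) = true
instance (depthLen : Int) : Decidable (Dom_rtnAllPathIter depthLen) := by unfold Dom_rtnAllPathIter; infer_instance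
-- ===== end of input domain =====

-- B replaces A's per-size itertools.combinations loop by one powerset sweep plus a single
-- (-len, lexicographic) sort; same return value, no speed claim (objective: alternative).

-- ===== PORT A =====
-- 'gap = depthLen-2; while gap >= 0: …; gap -= 1' is the descending run over the integers
-- depthLen-2, …, 0, i.e. a fold over (range(0, depthLen-1)).reverse; the body is transliterated.
def rtnAllPathIter (depthLen : Int) : List (List Int) :=
  ((PySem.List.pyRange 0 (depthLen - 1) 1).reverse).foldl
    (fun allPathList gap =>
      (PySem.List.combinations (PySem.List.pyRange 1 (depthLen - 1) 1) gap.toNat).foldl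
        (fun allPathList comb =>
          allPathList ++ [PySem.List.insert (comb ++ [depthLen - 1]) 0 0])
        allPathList)
    []

-- ===== PORT B =====
def rtnAllPathIter_alt (depthLen : Int) : List (List Int) :=
  if depthLen < 2 then []
  else
    let subsets :=
      (PySem.List.pyRange 1 (depthLen - 1) 1).foldl
        (fun acc x => acc ++ acc.map (fun s => s ++ [x])) [[]]
    let sortedSubsets :=
      PySem.List.sorted2 subsets (fun s => -(s.length : Int)) (fun s => s)
    sortedSubsets.map (fun s => 0 :: (s ++ [depthLen - 1]))

-- ===== PRECONDITION & SPEC =====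
def Spec_rtnAllPathIter (depthLen : Int) (out : List (List Int)) : Prop := out = rtnAllPathIter_alt depthLen
instance (depthLen : Int) (out : List (List Int)) : Decidable (Spec_rtnAllPathIter depthLen out) := by unfold Spec_rtnAllPathIter; infer_instance

-- ===== CLAIM (what is proved, stated in full; the proofs are below) =====
def Claim_equal_rtnAllPathIter : Prop := ∀ (depthLen : Int), Dom_rtnAllPathIter depthLen → Spec_rtnAllPathIter depthLen (rtnAllPathIter depthLen)

-- ===== LEMMAS AND PROOFS =====

-- B's powerset sweep, as a named function (used only in the proofs below).
def pvPow (l : List Int) : List (List Int) :=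
  l.foldl (fun acc x => acc ++ acc.map (fun s => s ++ [x])) [[]]

-- A's output order, as one flatMap: subset sizes descending, combinations within a size.
def pvTarget (l : List Int) : List (List Int) :=
  ((List.range (l.length + 1)).reverse).flatMap (fun k => PySem.List.combinations l k)

-- the sort key of B, spelled with toLex so Prod.Lex order lemmas apply
def pvKey (s : List Int) : Lex (Int × List Int) := toLex (-(s.length : Int), s)

theorem pvPow_concat (l : List Int) (x : Int) :
    pvPow (l ++ [x]) = pvPow l ++ (pvPow l).map (fun s => s ++ [x]) := by
  unfold pvPow; rw [List.foldl_append]; rfl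

theorem mem_pvPow (l : List Int) (s : List Int) : s ∈ pvPow l ↔ s.Sublist l := by
  induction l using List.reverseRecOn generalizing s with
  | nil => simp [pvPow]
  | append_singleton l x ih =>
    rw [pvPow_concat]
    constructor
    · intro h
      rcases List.mem_append.1 h with h | h
      · exact ((ih s).1 h).trans (List.sublist_append_left l [x])
      · rcases List.mem_map.1 h with ⟨t, ht, rfl⟩
        exact ((ih t).1 ht).append (List.Sublist.refl [x])
    · intro h
      rcases List.sublist_append_iff.1 h with ⟨l₁, l₂, rfl, h₁, h₂⟩
      rcases List.sublist_singleton.1 h₂ with rfl | rfl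
      · exact List.mem_append.2 (Or.inl ((ih (l₁ ++ [])).2 (by simpa using h₁)))
      · exact List.mem_append.2 (Or.inr (List.mem_map.2 ⟨l₁, (ih l₁).2 h₁, rfl⟩))

theorem nodup_pvPow (l : List Int) (h : l.Nodup) : (pvPow l).Nodup := by
  induction l using List.reverseRecOn with
  | nil => simp [pvPow]
  | append_singleton l x ih =>
    have hnd : l.Nodup ∧ x ∉ l := by
      constructor
      · exact h.sublist (List.sublist_append_left l [x])
      · intro hx
        exact (List.disjoint_of_nodup_append h) hx (by simp)
    rw [pvPow_concat]
    refine List.Nodup.append (ih hnd.1) ((ih hnd.1).map (List.append_left_injective [x])) ?_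
    intro u hu hum
    rcases List.mem_map.1 hum with ⟨t, _, rfl⟩
    have : x ∈ l := ((mem_pvPow l (t ++ [x])).1 hu).mem (by simp)
    exact hnd.2 this

theorem pairwise_combinations_lt (l : List Int) (h : l.Pairwise (· < ·)) :
    ∀ k, (PySem.List.combinations l k).Pairwise (fun a b : List Int => a < b) := by
  induction l with
  | nil =>
    intro k
    cases k with
    | zero => simp [PySem.List.combinations_zero]
    | succ k => simp [PySem.List.combinations_nil_succ]
  | cons x xs ih =>
    intro k
    cases k with
    | zero => simp [PySem.List.combinations_zero]
    | succ k =>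
      rw [PySem.List.combinations_cons_succ]
      have hxs : xs.Pairwise (· < ·) := (List.pairwise_cons.1 h).2
      have hx : ∀ y ∈ xs, x < y := (List.pairwise_cons.1 h).1
      refine List.pairwise_append.2 ⟨?_, ih hxs (k + 1), ?_⟩
      · rw [List.pairwise_map]
        exact (ih hxs k).imp (fun hab => List.cons_lt_cons_iff.2 (Or.inr ⟨rfl, hab⟩))
      · intro a ha b hb
        rcases List.mem_map.1 ha with ⟨a', _, rfl⟩
        have hblen : b.length = k + 1 := PySem.List.length_of_mem_combinations hb
        cases b with
        | nil => simp at hblen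
        | cons y b' =>
          have hy : y ∈ xs :=
            (PySem.List.sublist_of_mem_combinations hb).mem (by simp)
          exact List.cons_lt_cons_iff.2 (Or.inl (hx y hy))

theorem mem_pvTarget (l : List Int) (s : List Int) : s ∈ pvTarget l ↔ s.Sublist l := by
  unfold pvTarget
  simp only [List.mem_flatMap, List.mem_reverse, List.mem_range,
    PySem.List.mem_combinations_iff]
  constructor
  · rintro ⟨k, _, hs, _⟩; exact hs
  · intro hs
    exact ⟨s.length, Nat.lt_succ_of_le hs.length_le, hs, rfl⟩

theorem pairwise_key_pvTarget (l : List Int) (h : l.Pairwise (· < ·)) :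
    (pvTarget l).Pairwise (fun a b => pvKey a < pvKey b) := by
  unfold pvTarget
  rw [List.pairwise_flatMap]
  constructor
  · intro k _
    refine List.Pairwise.imp_of_mem ?_ (pairwise_combinations_lt l h k)
    intro a b ha hb hab
    have hla : a.length = k := PySem.List.length_of_mem_combinations ha
    have hlb : b.length = k := PySem.List.length_of_mem_combinations hb
    unfold pvKey
    rw [Prod.Lex.lt_iff]
    exact Or.inr ⟨by simp [hla, hlb], hab⟩
  · rw [List.pairwise_reverse]
    refine List.pairwise_lt_range.imp ?_
    intro j k hjk x hx y hy
    have hlx : x.length = k := PySem.List.length_of_mem_combinations hx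
    have hly : y.length = j := PySem.List.length_of_mem_combinations hy
    unfold pvKey
    rw [Prod.Lex.lt_iff]
    exact Or.inl (by simp [hlx, hly]; omega)

theorem sorted2_eq_sorted_toLex {α : Type} (xs : List α) (k1 : α → Int) (k2 : α → List Int) :
    PySem.List.sorted2 xs k1 k2 = PySem.List.sorted xs (fun x => toLex (k1 x, k2 x)) := by
  unfold PySem.List.sorted2 PySem.List.sorted
  simp only []
  congr 1
  funext acc x
  congr 1
  funext a b
  rcases lt_trichotomy (k1 a) (k1 b) with h | h | h
  · simp [Prod.Lex.lt_iff, h, not_lt.2 (le_of_lt h)]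
  · simp [Prod.Lex.lt_iff, h]
  · simp [Prod.Lex.lt_iff, h, not_lt.2 (le_of_lt h), ne_of_gt h]

theorem sorted_pvPow_eq_pvTarget (l : List Int) (h : l.Pairwise (· < ·)) :
    PySem.List.sorted2 (pvPow l) (fun s => -(s.length : Int)) (fun s => s) = pvTarget l := by
  rw [sorted2_eq_sorted_toLex]
  refine PySem.List.sorted_eq_of_perm_of_pairwise_lt _ _ _ ?_ (pairwise_key_pvTarget l h)
  have hnt : (pvTarget l).Nodup :=
    (pairwise_key_pvTarget l h).imp (fun hab heq => absurd (heq ▸ hab) (lt_irrefl _))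
  have hnp : (pvPow l).Nodup := nodup_pvPow l (h.imp ne_of_lt)
  exact (List.perm_ext_iff_of_nodup hnt hnp).2
    (fun a => (mem_pvTarget l a).trans ((mem_pvPow l a).symm))

-- ===== VERDICT (by name: the statement is the Claim_ definition above) =====
theorem rtnAllPathIter_spec : Claim_equal_rtnAllPathIter := by
  intro d _
  unfold Spec_rtnAllPathIter
  by_cases hd : d < 2
  · have h0 : (d - 1 - 0).toNat = 0 := by omega
    unfold rtnAllPathIter rtnAllPathIter_alt
    rw [PySem.List.pyRange_one 0 (d - 1), h0, if_pos hd]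
    simp
  · have hm : (d - 1 - 0).toNat = (d - 1 - 1).toNat + 1 := by omega
    have hA : rtnAllPathIter d =
        ((List.range ((d - 1 - 1).toNat + 1)).reverse).flatMap
          (fun k => (PySem.List.combinations (PySem.List.pyRange 1 (d - 1) 1) k).map
            (fun c => 0 :: (c ++ [d - 1]))) := by
      unfold rtnAllPathIter
      rw [PySem.List.pyRange_one 0 (d - 1), hm]
      simp only [PySem.List.insert_zero, PySem.List.foldl_append_singleton_eq_map,
        PySem.List.foldl_append_eq_flatMap]
      rw [← List.map_reverse, List.flatMap_map]
      simp
    have hB : rtnAllPathIter_alt d =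
        (pvTarget (PySem.List.pyRange 1 (d - 1) 1)).map (fun s => 0 :: (s ++ [d - 1])) := by
      unfold rtnAllPathIter_alt
      rw [if_neg hd]
      show (PySem.List.sorted2 (pvPow (PySem.List.pyRange 1 (d - 1) 1))
        (fun s => -(s.length : Int)) (fun s => s)).map (fun s => 0 :: (s ++ [d - 1])) = _
      rw [sorted_pvPow_eq_pvTarget _ (PySem.List.pairwise_lt_pyRange_one 1 (d - 1))]
    rw [hA, hB]
    unfold pvTarget
    rw [List.map_flatMap, PySem.List.length_pyRange_one]
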